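-- pv_equiv track=rewrite | github.com/pyfarm/pyfarm-master | pyfarm/models/core/functions.py | split_and_extend
-- ===== SOURCE A (Python) =====
-- def split_and_extend(items):
--     """
--     Takes a list of input elements and splits them
--     before producing an extended set.
--
--     **Example**
--         >>> split_and_extend(["root.admin", "admin"])
--         set(['admin', 'root.admin', 'root'])
--     """
--     if not items:
--         return items
--
--     output = set()
--
--     for item in items:
--         current = []
--
--         for split_item in item.split("."):
--             current = current + [split_item]
--             output.add(".".join(current))
--
--     return output
-- ===== SOURCE B (Python) =====
-- def split_and_extend(items):
--     if not items:
--         return items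
--     output = set()
--     for item in items:
--         for i, ch in enumerate(item):
--             if ch == '.':
--                 output.add(item[:i])
--         output.add(item)
--     return output
-- ===== Notes on version B (the rewrite author's own statement) =====
-- stated objective: simpler
-- what changed: B replaces A's split/join machinery (split on '.', rebuild each prefix with a growing list and '.'.join) by a single character scan per item that slices the untouched string at each dot position, avoiding any list rebuilding or joining.
import Mathlib
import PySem

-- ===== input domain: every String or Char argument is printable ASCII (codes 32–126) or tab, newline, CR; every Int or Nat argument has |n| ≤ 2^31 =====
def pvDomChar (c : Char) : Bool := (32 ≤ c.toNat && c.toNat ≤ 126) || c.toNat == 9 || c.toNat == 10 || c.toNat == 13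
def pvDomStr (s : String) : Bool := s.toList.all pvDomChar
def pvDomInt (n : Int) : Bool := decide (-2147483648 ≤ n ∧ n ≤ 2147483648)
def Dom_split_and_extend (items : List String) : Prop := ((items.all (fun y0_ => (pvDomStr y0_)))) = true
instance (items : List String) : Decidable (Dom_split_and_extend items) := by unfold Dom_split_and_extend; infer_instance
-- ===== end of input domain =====

-- B replaces A's split-then-join prefix construction by a single character scan that
-- slices the original string at each '.' position; objective: simpler (same cost).


-- ===== PORT A =====
-- A returns `items` itself when the list is empty; otherwise it builds the set of
-- dotted prefixes by splitting each item on "." and re-joining growing prefix lists.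
def split_and_extend (items : List String) : List String :=
  if items = [] then items
  else
    items.foldl
      (fun output item =>
        ((PySem.Chars.splitOn item.toList ['.']).foldl
          (fun (st : List (List Char) × PySem.Set String) split_item =>
            let current := st.1 ++ [split_item]
            (current, PySem.Set.add st.2 (String.ofList (PySem.Chars.join ['.'] current))))
          ([], output)).2)
      PySem.Set.empty

-- ===== PORT B =====
-- B scans each item's characters once, adding the slice item[:i] at every dot
-- position i, then the item itself.
def split_and_extend_alt (items : List String) : List String :=
  if items = [] then items
  else
    items.foldl
      (fun output item =>
        PySem.Set.add
          ((PySem.List.enumerate item.toList).foldl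
            (fun output p =>
              if p.2 = '.' then
                PySem.Set.add output (String.ofList (PySem.Chars.slice item.toList none (some p.1)))
              else output)
            output)
          item)
      PySem.Set.empty

-- ===== PRECONDITION & SPEC =====
def Spec_split_and_extend (items : List String) (out : List String) : Prop := out = split_and_extend_alt items
instance (items : List String) (out : List String) : Decidable (Spec_split_and_extend items out) := by unfold Spec_split_and_extend; infer_instance

-- ===== CLAIM (what is proved, stated in full; the proofs are below) =====
def Claim_equal_split_and_extend : Prop := ∀ (items : List String), Dom_split_and_extend items → Spec_split_and_extend items (split_and_extend items)

-- ===== LEMMAS AND PROOFS =====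

def pvAddPre (q : List Char) : List (List Char) → List (List Char)
  | [] => [q]
  | p :: ps => (q ++ p) :: ps

def pvSplitD : List Char → List (List Char)
  | [] => [[]]
  | c :: r => if c = '.' then [] :: pvSplitD r else pvAddPre [c] (pvSplitD r)

theorem pvSplitD_ne_nil (cs : List Char) : pvSplitD cs ≠ [] := by
  cases cs with
  | nil => simp [pvSplitD]
  | cons c r =>
    simp only [pvSplitD]
    split
    · simp
    · cases h : pvSplitD r <;> simp [pvAddPre]

theorem pv_go_eq (fuel : Nat) : ∀ (l cur : List Char) (acc : List (List Char)),
    l.length < fuel →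
    PySem.Chars.splitOn.go ['.'] fuel l cur acc = acc.reverse ++ pvAddPre cur.reverse (pvSplitD l) := by
  induction fuel with
  | zero => intro l cur acc h; omega
  | succ fuel ih =>
    intro l cur acc h
    cases l with
    | nil =>
      simp [PySem.Chars.splitOn.go, pvSplitD, pvAddPre]
    | cons c rest =>
      rw [PySem.Chars.splitOn.go]
      by_cases hc : c = '.'
      · subst hc
        simp only [List.isPrefixOf, BEq.rfl, Bool.true_and, if_pos]
        rw [ih _ _ _ (by simpa using Nat.lt_of_succ_lt_succ h)]
        simp only [pvSplitD]
        cases hs : pvSplitD rest with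
        | nil => exact absurd hs (pvSplitD_ne_nil rest)
        | cons p ps => simp [pvAddPre, hs]
      · rw [if_neg (by simp [List.isPrefixOf]; exact fun hh => hc hh.symm)]
        rw [ih _ _ _ (by simpa using Nat.lt_of_succ_lt_succ h)]
        simp only [pvSplitD, if_neg hc, List.reverse_cons]
        cases hs : pvSplitD rest with
        | nil => exact absurd hs (pvSplitD_ne_nil rest)
        | cons p ps => simp [pvAddPre]

theorem pv_splitOn_eq (cs : List Char) : PySem.Chars.splitOn cs ['.'] = pvSplitD cs := by
  rw [PySem.Chars.splitOn, pv_go_eq _ _ _ _ (by omega)]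
  cases hs : pvSplitD cs with
  | nil => exact absurd hs (pvSplitD_ne_nil cs)
  | cons p ps => simp [pvAddPre]

def pvDots : List Char → List (List Char)
  | [] => []
  | c :: r => (if c = '.' then [[]] else []) ++ (pvDots r).map (c :: ·)

def pvJadds : List (List Char) → List (List Char) → List (List Char)
  | _, [] => []
  | cur, p :: ps => PySem.Chars.join ['.'] (cur ++ [p]) :: pvJadds (cur ++ [p]) ps

theorem pv_join_cons_head (sep : List Char) (c : Char) (q : List Char) (l : List (List Char)) :
    PySem.Chars.join sep ((c :: q) :: l) = c :: PySem.Chars.join sep (q :: l) := by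
  cases l <;> simp [PySem.Chars.join, List.intercalate, List.intersperse]

theorem pv_join_nil_head (q : List Char) (l : List (List Char)) :
    PySem.Chars.join ['.'] ([] :: q :: l) = '.' :: PySem.Chars.join ['.'] (q :: l) := by
  cases l <;> simp [PySem.Chars.join, List.intercalate, List.intersperse]

theorem pv_join_single (sep p : List Char) : PySem.Chars.join sep [p] = p := by
  simp [PySem.Chars.join, List.intercalate, List.intersperse]

theorem pv_U (ps : List (List Char)) :
    ∀ (cur1 cur2 : List (List Char)) (c : Char),
    (∀ l : List (List Char), l ≠ [] →
      PySem.Chars.join ['.'] (cur1 ++ l) = c :: PySem.Chars.join ['.'] (cur2 ++ l)) →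
    pvJadds cur1 ps = (pvJadds cur2 ps).map (c :: ·) := by
  induction ps with
  | nil => intro _ _ _ _; simp [pvJadds]
  | cons p ps ih =>
    intro cur1 cur2 c hj
    simp only [pvJadds, List.map_cons]
    exact congrArg₂ List.cons (hj [p] (by simp))
      (ih (cur1 ++ [p]) (cur2 ++ [p]) c (by
        intro l hl
        rw [List.append_assoc, List.append_assoc]
        exact hj ([p] ++ l) (by simp)))

theorem pv_ID (cs : List Char) : pvJadds [] (pvSplitD cs) = pvDots cs ++ [cs] := by
  induction cs with
  | nil => simp [pvSplitD, pvJadds, pvDots]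
  | cons c r ih =>
    cases hs : pvSplitD r with
    | nil => exact absurd hs (pvSplitD_ne_nil r)
    | cons p ps =>
      rw [hs] at ih
      by_cases hc : c = '.'
      · subst hc
        rw [show pvSplitD ('.' :: r) = [] :: p :: ps by simp [pvSplitD, hs]]
        have h2 : pvJadds [[], p] ps = (pvJadds [p] ps).map ('.' :: ·) := by
          apply pv_U
          intro l hl
          cases l with
          | nil => exact absurd rfl hl
          | cons x xs =>
            show PySem.Chars.join ['.'] ([] :: p :: x :: xs) = _
            rw [pv_join_nil_head]
            rfl
        have hip : pvJadds [] (p :: ps) = p :: pvJadds [p] ps := by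
          simp [pvJadds]
        rw [hip] at ih
        show ([] : List Char) :: PySem.Chars.join ['.'] [[], p] :: pvJadds [[], p] ps
            = pvDots ('.' :: r) ++ ['.' :: r]
        have hj2 : PySem.Chars.join ['.'] [[], p] = '.' :: p := by
          rw [pv_join_nil_head, pv_join_single]
        rw [hj2, h2, show pvDots ('.' :: r) = [] :: (pvDots r).map ('.' :: ·) from by
          simp [pvDots]]
        simp only [List.cons_append, List.cons.injEq, true_and]
        rw [show ('.' :: p) :: List.map (fun x => '.' :: x) (pvJadds [p] ps)
            = List.map (fun x => '.' :: x) (p :: pvJadds [p] ps) from rfl, ih]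
        simp
      · rw [show pvSplitD (c :: r) = (c :: p) :: ps by simp [pvSplitD, hs, pvAddPre, hc]]
        have hip : pvJadds [] (p :: ps) = p :: pvJadds [p] ps := by
          simp [pvJadds]
        rw [hip] at ih
        have h2 : pvJadds [c :: p] ps = (pvJadds [p] ps).map (c :: ·) := by
          apply pv_U
          intro l hl
          cases l with
          | nil => exact absurd rfl hl
          | cons x xs =>
            show PySem.Chars.join ['.'] ((c :: p) :: x :: xs) = _
            rw [pv_join_cons_head]
            rfl
        show PySem.Chars.join ['.'] [c :: p] :: pvJadds [c :: p] ps
            = pvDots (c :: r) ++ [c :: r]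
        rw [pv_join_single, h2, show pvDots (c :: r) = (pvDots r).map (c :: ·) from by
          simp [pvDots, hc]]
        rw [show (c :: p) :: List.map (fun x => c :: x) (pvJadds [p] ps)
            = List.map (fun x => c :: x) (p :: pvJadds [p] ps) from rfl, ih]
        simp

theorem pv_foldA (parts : List (List Char)) :
    ∀ (cur : List (List Char)) (out : PySem.Set String),
    ((parts.foldl
        (fun (st : List (List Char) × PySem.Set String) split_item =>
          let current := st.1 ++ [split_item]
          (current, PySem.Set.add st.2 (String.ofList (PySem.Chars.join ['.'] current))))
        (cur, out)).2)
      = PySem.Set.update out ((pvJadds cur parts).map String.ofList) := by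
  induction parts with
  | nil => intro cur out; simp [pvJadds, PySem.Set.update]
  | cons p ps ih =>
    intro cur out
    simp only [List.foldl_cons]
    rw [ih]
    rfl

theorem pv_E (item : String) (cs : List Char) :
    ∀ (pre : List Char) (out : PySem.Set String), item.toList = pre ++ cs →
    ((PySem.List.enumerate cs (pre.length : Int)).foldl
        (fun output p =>
          if p.2 = '.' then
            PySem.Set.add output (String.ofList (PySem.Chars.slice item.toList none (some p.1)))
          else output)
        out)
      = PySem.Set.update out ((pvDots cs).map (fun q => String.ofList (pre ++ q))) := by
  induction cs with
  | nil => intro pre out _; simp [pvDots, PySem.Set.update, PySem.List.enumerate]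
  | cons c cs ih =>
    intro pre out hpc
    rw [PySem.List.enumerate_cons]
    have hstep : ((pre.length : Int) + 1) = (((pre ++ [c]).length : Nat) : Int) := by
      simp
    simp only [List.foldl_cons, hstep]
    by_cases hc : c = '.'
    · subst hc
      rw [if_pos rfl]
      have hsl : PySem.Chars.slice item.toList none (some (pre.length : Int)) = pre := by
        show PySem.List.slice _ _ _ = _
        rw [hpc, PySem.List.slice_to_natCast, List.take_left]
      rw [hsl, ih (pre ++ ['.']) _ (by rw [hpc]; simp)]
      rw [show pvDots ('.' :: cs) = [] :: (pvDots cs).map ('.' :: ·) from by simp [pvDots]]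
      simp only [List.map_cons, List.map_map, List.append_nil]
      show PySem.Set.update (PySem.Set.add out (String.ofList pre)) _
          = PySem.Set.update (PySem.Set.add out (String.ofList pre)) _
      congr 1
      simp [Function.comp, List.append_assoc]
    · rw [if_neg (by simpa using hc)]
      rw [ih (pre ++ [c]) _ (by rw [hpc]; simp)]
      rw [show pvDots (c :: cs) = (pvDots cs).map (c :: ·) from by simp [pvDots, hc]]
      congr 1
      simp [Function.comp, List.append_assoc]

theorem pv_body (out : PySem.Set String) (item : String) :
    ((PySem.Chars.splitOn item.toList ['.']).foldl
        (fun (st : List (List Char) × PySem.Set String) split_item =>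
          let current := st.1 ++ [split_item]
          (current, PySem.Set.add st.2 (String.ofList (PySem.Chars.join ['.'] current))))
        ([], out)).2
    = PySem.Set.add
        ((PySem.List.enumerate item.toList).foldl
          (fun output p =>
            if p.2 = '.' then
              PySem.Set.add output (String.ofList (PySem.Chars.slice item.toList none (some p.1)))
            else output)
          out)
        item := by
  rw [pv_splitOn_eq, pv_foldA, pv_ID]
  rw [show ((0 : Int) = (((List.length ([] : List Char)) : Nat) : Int)) from by simp]
  rw [pv_E item item.toList [] out (by simp)]
  simp only [List.nil_append, List.map_append, List.map_cons, List.map_nil]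
  rw [PySem.Set.update_append]
  simp [PySem.Set.update, String.ofList_toList]

-- ===== VERDICT (by name: the statement is the Claim_ definition above) =====
theorem split_and_extend_spec : Claim_equal_split_and_extend := by
  intro items _
  unfold Spec_split_and_extend
  rw [split_and_extend, split_and_extend_alt]
  by_cases h : items = []
  · rw [if_pos h, if_pos h]
  · rw [if_neg h, if_neg h]
    apply congrFun
    apply congrFun
    apply congrArg
    funext out item
    exact pv_body out item
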